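-- pv_equiv track=rewrite | github.com/josdiaz-tech/hack_python_2 | hack_1.py | fn_hack_1
-- ===== SOURCE A (Python) =====
-- def fn_hack_1(s):
--     result = s
--     vocales = ['i','o','u']
--     tamano_s = len(s)
--     for x in range(tamano_s):
--         if result[x] in vocales:
--             vocales.remove(result[x])
--             result = result.replace(result[x], result[x].upper(), 1)
--
--     return result
-- ===== SOURCE B (Python) =====
-- def fn_hack_1(s):
--     seen = set()
--     out = []
--     for c in s:
--         if c in ('i', 'o', 'u') and c not in seen:
--             seen.add(c)
--             out.append(c.upper())
--         else:
--             out.append(c)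
--     return ''.join(out)
-- ===== Notes on version B (the rewrite author's own statement) =====
-- stated objective: simpler
-- what changed: A tracks a shrinking list of remaining vowels and for each hit rescans the whole string with str.replace(.., 1); B builds the output in a single pass, keeping a set of vowels already uppercased.
import Mathlib
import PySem

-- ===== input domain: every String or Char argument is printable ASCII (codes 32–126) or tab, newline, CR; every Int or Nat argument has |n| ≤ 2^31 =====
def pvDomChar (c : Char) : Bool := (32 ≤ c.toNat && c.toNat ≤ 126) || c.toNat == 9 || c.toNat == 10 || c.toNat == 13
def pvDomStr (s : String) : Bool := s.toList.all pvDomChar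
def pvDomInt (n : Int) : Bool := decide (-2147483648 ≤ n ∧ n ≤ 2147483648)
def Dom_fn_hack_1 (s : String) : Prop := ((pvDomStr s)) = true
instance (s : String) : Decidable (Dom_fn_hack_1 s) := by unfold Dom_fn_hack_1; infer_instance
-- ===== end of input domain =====

-- B builds the output in one left-to-right pass with a `seen` set, replacing A's
-- per-index membership test plus repeated full-string `replace` rescans (objective: simpler).


-- ===== PORT A =====
-- hand port of `result.replace(old, new, 1)` for a ONE-CHARACTER `old` (exact there:
-- Python replaces the first occurrence of `old`, splicing `new` in its place)
def pvReplace1 (cs : List Char) (old : Char) (new : List Char) : List Char :=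
  match cs with
  | [] => []
  | c :: t => if c = old then new ++ t else c :: pvReplace1 t old new

-- the body of A's `for x in range(tamano_s)` loop, state = (result, vocales)
def pvHackStep (st : List Char × List Char) (x : Int) : List Char × List Char :=
  let c := PySem.List.pyGetD st.1 x 'a'   -- result[x]; x is always in range (len is constant)
  if c ∈ st.2 then
    (pvReplace1 st.1 c (PySem.Chars.upper [c]), (PySem.List.remove? st.2 c).getD st.2)
  else st

def fn_hack_1 (s : String) : String :=
  let fin := (PySem.List.pyRange 0 (PySem.Str.len s) 1).foldl pvHackStep
    (s.toList, ['i', 'o', 'u'])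
  String.mk fin.1

-- ===== PORT B =====
-- one pass over the characters; `seen` is the set of vowels already uppercased
def pvAltGo (seen : PySem.Set Char) : List Char → List Char
  | [] => []
  | c :: t =>
    if c ∈ (['i', 'o', 'u'] : List Char) ∧ c ∉ seen then
      PySem.Chars.upper [c] ++ pvAltGo (PySem.Set.add seen c) t
    else c :: pvAltGo seen t

def fn_hack_1_alt (s : String) : String :=
  String.mk (pvAltGo (PySem.Set.ofList []) s.toList)

-- ===== PRECONDITION & SPEC =====
def Spec_fn_hack_1 (s : String) (out : String) : Prop := out = fn_hack_1_alt s
instance (s : String) (out : String) : Decidable (Spec_fn_hack_1 s out) := by unfold Spec_fn_hack_1; infer_instance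

-- ===== CLAIM (what is proved, stated in full; the proofs are below) =====
def Claim_equal_fn_hack_1 : Prop := ∀ (s : String), Dom_fn_hack_1 s → Spec_fn_hack_1 s (fn_hack_1 s)

-- ===== LEMMAS AND PROOFS =====

lemma pvReplace1_append_not_mem (pre : List Char) (old : Char) (new t : List Char)
    (h : old ∉ pre) : pvReplace1 (pre ++ old :: t) old new = pre ++ (new ++ t) := by
  induction pre with
  | nil => simp [pvReplace1]
  | cons p ps ih =>
    have hp : p ≠ old := fun he => h (he ▸ List.mem_cons_self)
    simp [pvReplace1, hp, ih (fun hm => h (List.mem_cons_of_mem _ hm))]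

-- the loop invariant: A's fold over the remaining indices equals B's pass over the suffix
lemma pvLoop_eq : ∀ (rest pre voc : List Char) (seen : PySem.Set Char),
    voc.Nodup →
    (∀ c, c ∈ voc ↔ (c ∈ (['i', 'o', 'u'] : List Char) ∧ c ∉ seen)) →
    (∀ c ∈ voc, c ∉ pre) →
    ((PySem.List.pyRange (pre.length : Int) ((pre.length : Int) + rest.length) 1).foldl
        pvHackStep (pre ++ rest, voc)).1 = pre ++ pvAltGo seen rest := by
  intro rest
  induction rest with
  | nil =>
    intro pre voc seen _ _ _
    rw [show ((pre.length : Int) + (([] : List Char).length : Int)) = (pre.length : Int) by simp,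
      PySem.List.pyRange_one_eq_nil le_rfl]
    simp [pvAltGo]
  | cons c t ih =>
    intro pre voc seen hnd hiff hpre
    have hlt : (pre.length : Int) < (pre.length : Int) + (c :: t).length := by
      simp only [List.length_cons]
      push_cast
      omega
    rw [PySem.List.pyRange_one_cons hlt, List.foldl_cons]
    have hget : PySem.List.pyGetD (pre ++ c :: t) (pre.length : Int) 'a' = c := by
      rw [PySem.List.pyGetD_natCast]
      simp [List.getD_eq_getElem?_getD]
    by_cases hc : c ∈ voc
    · -- A uppercases c, removes it from vocales; B uppercases c, adds it to seen
      have hciou : c ∈ (['i', 'o', 'u'] : List Char) := ((hiff c).mp hc).1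
      have hcseen : c ∉ seen := ((hiff c).mp hc).2
      have hstep : pvHackStep (pre ++ c :: t, voc) (pre.length : Int)
          = (pre ++ (PySem.Chars.upper [c] ++ t), voc.erase c) := by
        simp only [pvHackStep, hget, hc, if_pos]
        rw [PySem.List.remove?_eq_some_erase voc c hc,
          pvReplace1_append_not_mem pre c _ _ (hpre c hc)]
        rfl
      rw [hstep]
      -- the uppercased character, as a list
      obtain ⟨C, hC⟩ : ∃ C, PySem.Chars.upper [c] = [C] ∧ C ∈ (['I', 'O', 'U'] : List Char) := by
        fin_cases hciou <;> exact ⟨_, rfl, by decide⟩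
      have hiff' : ∀ c', c' ∈ voc.erase c ↔
          (c' ∈ (['i', 'o', 'u'] : List Char) ∧ c' ∉ PySem.Set.add seen c) := by
        intro c'
        rw [hnd.mem_erase_iff, hiff c', PySem.Set.mem_add]
        constructor
        · rintro ⟨hne, hiou, hs⟩
          exact ⟨hiou, fun h => h.elim hs hne⟩
        · rintro ⟨hiou, hs⟩
          exact ⟨fun h => hs (Or.inr h), hiou, fun h => hs (Or.inl h)⟩
      have hpre' : ∀ c' ∈ voc.erase c, c' ∉ pre ++ [C] := by
        intro c' hc'
        have hv : c' ∈ voc := List.mem_of_mem_erase hc'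
        have hiou' : c' ∈ (['i', 'o', 'u'] : List Char) := ((hiff c').mp hv).1
        intro hm
        rcases List.mem_append.mp hm with h | h
        · exact hpre c' hv h
        · have he : c' = C := List.mem_singleton.mp h
          subst he
          have h2 := hC.2
          fin_cases hiou' <;> exact absurd h2 (by decide)
      have := ih (pre ++ [C]) (voc.erase c) (PySem.Set.add seen c)
        (hnd.erase c) hiff' hpre'
      have harr : PySem.List.pyRange ((pre.length : Int) + 1)
            ((pre.length : Int) + (c :: t).length) 1
          = PySem.List.pyRange (((pre ++ [C]).length : Int))
            (((pre ++ [C]).length : Int) + t.length) 1 := by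
        congr 1 <;> push_cast <;> simp <;> omega
      rw [harr]
      have hsplit : pre ++ (PySem.Chars.upper [c] ++ t) = (pre ++ [C]) ++ t := by
        rw [hC.1]; simp
      rw [hsplit, this]
      simp only [pvAltGo]
      rw [if_pos ⟨hciou, hcseen⟩, hC.1]
      simp
    · -- untouched character
      have hstep : pvHackStep (pre ++ c :: t, voc) (pre.length : Int) = (pre ++ c :: t, voc) := by
        simp [pvHackStep, hget, hc]
      rw [hstep]
      have hpre' : ∀ c' ∈ voc, c' ∉ pre ++ [c] := by
        intro c' hc' hm
        rcases List.mem_append.mp hm with h | h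
        · exact hpre c' hc' h
        · exact hc ((List.mem_singleton.mp h) ▸ hc')
      have := ih (pre ++ [c]) voc seen hnd hiff hpre'
      have harr : PySem.List.pyRange ((pre.length : Int) + 1)
            ((pre.length : Int) + (c :: t).length) 1
          = PySem.List.pyRange (((pre ++ [c]).length : Int))
            (((pre ++ [c]).length : Int) + t.length) 1 := by
        congr 1 <;> push_cast <;> simp <;> omega
      have hsplit : pre ++ c :: t = (pre ++ [c]) ++ t := by simp
      rw [hsplit, harr, this]
      have hB : pvAltGo seen (c :: t) = c :: pvAltGo seen t := by
        have : ¬ (c ∈ (['i', 'o', 'u'] : List Char) ∧ c ∉ seen) := fun h => hc ((hiff c).mpr h)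
        simp only [pvAltGo]
        rw [if_neg this]
      rw [hB]; simp

-- ===== VERDICT (by name: the statement is the Claim_ definition above) =====
theorem fn_hack_1_spec : Claim_equal_fn_hack_1 := by
  intro s _
  unfold Spec_fn_hack_1 fn_hack_1 fn_hack_1_alt
  have h := pvLoop_eq s.toList [] ['i', 'o', 'u'] (PySem.Set.ofList [])
    (by decide) (by intro c; simp [PySem.Set.ofList]) (by simp)
  simp only [List.nil_append, List.length_nil, Int.natCast_zero, Int.zero_add] at h
  simp only [PySem.Str.len_eq]
  rw [h]
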